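-- pv_equiv track=rewrite | github.com/jKaleba/WDI | Z6/Z6.py | ex8WeightOnBothSides
-- ===== SOURCE A (Python) =====
-- def ex8WeightOnBothSides(n: int, weights: list[int], index=0):
--     if n == 0:
--         return True
--
--     if index == len(weights):
--         return False
--
--     return ex8WeightOnBothSides(n - weights[index], weights, index + 1) \
--            or ex8WeightOnBothSides(n, weights, index + 1) \
--            or ex8WeightOnBothSides(n + weights[index], weights, index + 1)
-- ===== SOURCE B (Python) =====
-- def ex8WeightOnBothSides(n: int, weights: list[int], index=0):
--     reachable = {0}
--     for w in weights[index:]: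
--         if n in reachable:
--             return True
--         reachable = {s + d for s in reachable for d in (-w, 0, w)}
--     return n in reachable
-- ===== Notes on version B (the rewrite author's own statement) =====
-- stated objective: alternative
-- what changed: Replaced the three-way recursion with a single forward pass that maintains the set of sums reachable from the weights consumed so far (returning as soon as n is reachable), answering by a membership test.
-- outside the precondition, e.g. on ex8WeightOnBothSides(5, [2, 3], -1): A returns True, B returns False
import Mathlib
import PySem

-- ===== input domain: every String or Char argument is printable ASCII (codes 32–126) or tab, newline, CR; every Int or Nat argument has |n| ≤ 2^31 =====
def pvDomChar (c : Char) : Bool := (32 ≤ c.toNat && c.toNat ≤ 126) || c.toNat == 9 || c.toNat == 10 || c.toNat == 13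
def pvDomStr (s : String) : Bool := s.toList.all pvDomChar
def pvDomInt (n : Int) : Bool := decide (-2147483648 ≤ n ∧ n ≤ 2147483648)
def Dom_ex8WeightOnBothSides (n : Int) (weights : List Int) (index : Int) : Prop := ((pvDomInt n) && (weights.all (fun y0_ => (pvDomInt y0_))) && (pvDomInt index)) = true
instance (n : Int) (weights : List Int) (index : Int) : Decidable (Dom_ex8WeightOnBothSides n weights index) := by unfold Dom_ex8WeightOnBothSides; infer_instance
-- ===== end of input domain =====

-- B replaces A's three-way recursion by one forward pass over the set of reachable
-- sums with an early exit; equivalence is about the return value.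

-- ===== PORT A =====
-- literal transliteration of A; where Python raises IndexError (pyGet? = none,
-- excluded by Pre_) the port returns false
def ex8WeightOnBothSides (n : Int) (weights : List Int) (index : Int) : Bool :=
  if n = 0 then true
  else if index = (weights.length : Int) then false
  else
    match h : PySem.List.pyGet? weights index with
    | none => false
    | some w =>
      ex8WeightOnBothSides (n - w) weights (index + 1)
      || ex8WeightOnBothSides n weights (index + 1)
      || ex8WeightOnBothSides (n + w) weights (index + 1)
termination_by ((weights.length : Int) + 1 - index).toNat
decreasing_by
  all_goals
    have hr : PySem.Raise.InRange weights.length index := by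
      by_contra hc
      rw [(PySem.List.pyGet?_eq_none_iff weights index).2 hc] at h
      simp at h
    unfold PySem.Raise.InRange at hr
    omega


-- ===== PORT B =====
-- B's loop: the set of sums reachable from the weights consumed so far,
-- returning early once n is reachable
def ex8Loop (n : Int) : List Int → PySem.Set Int → Bool
  | [], r => PySem.Set.contains r n
  | w :: ws, r =>
    if PySem.Set.contains r n then true
    else ex8Loop n ws (PySem.Set.ofList (r.flatMap (fun s => [s + -w, s + 0, s + w])))

def ex8WeightOnBothSides_alt (n : Int) (weights : List Int) (index : Int) : Bool :=
  ex8Loop n (PySem.List.slice weights (some index) none) (PySem.Set.ofList [0])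

-- ===== PRECONDITION & SPEC =====
-- Pre_ excludes negative indices with n ≠ 0: there A's recursion first walks the
-- wrapped-around tail and then the whole list again (a negative-index wraparound
-- accident of A's implementation), and it excludes index > len(weights) with n ≠ 0,
-- where A raises IndexError.
def Pre_ex8WeightOnBothSides (n : Int) (weights : List Int) (index : Int) : Prop :=
  n = 0 ∨ (0 ≤ index ∧ index ≤ (weights.length : Int))
instance (n : Int) (weights : List Int) (index : Int) : Decidable (Pre_ex8WeightOnBothSides n weights index) := by unfold Pre_ex8WeightOnBothSides; infer_instance
def pvWitness_ex8WeightOnBothSides : Int × List Int × Int := (5, [2, 3], 0)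

def Spec_ex8WeightOnBothSides (n : Int) (weights : List Int) (index : Int) (out : Bool) : Prop := out = ex8WeightOnBothSides_alt n weights index
instance (n : Int) (weights : List Int) (index : Int) (out : Bool) : Decidable (Spec_ex8WeightOnBothSides n weights index out) := by unfold Spec_ex8WeightOnBothSides; infer_instance

-- ===== CLAIM (what is proved, stated in full; the proofs are below) =====
def Claim_equal_ex8WeightOnBothSides : Prop := ∀ (n : Int) (weights : List Int) (index : Int), Dom_ex8WeightOnBothSides n weights index → Pre_ex8WeightOnBothSides n weights index → Spec_ex8WeightOnBothSides n weights index (ex8WeightOnBothSides n weights index)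

-- ===== LEMMAS AND PROOFS =====
-- one-step unfolding of A's recursive case (cited by the proofs below)
theorem ex8_unfold (n : Int) (weights : List Int) (index : Int) (w : Int)
    (hn : ¬ n = 0) (hne : ¬ index = (weights.length : Int))
    (hget : PySem.List.pyGet? weights index = some w) :
    ex8WeightOnBothSides n weights index
      = (ex8WeightOnBothSides (n - w) weights (index + 1)
         || ex8WeightOnBothSides n weights (index + 1)
         || ex8WeightOnBothSides (n + w) weights (index + 1)) := by
  rw [ex8WeightOnBothSides, if_neg hn, if_neg hne, hget]


-- ±/skip reachability of n over a list of weights (the common specification)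
def pvReach (n : Int) : List Int → Bool
  | [] => n = 0
  | w :: ws => pvReach (n - w) ws || pvReach n ws || pvReach (n + w) ws

theorem pvReach_zero (ws : List Int) : pvReach 0 ws = true := by
  induction ws with
  | nil => simp [pvReach]
  | cons w ws ih => simp [pvReach, ih]

-- A computes pvReach on the suffix, for 0 ≤ index ≤ len
theorem ex8_eq_reach (weights : List Int) :
    ∀ k (n index : Int), 0 ≤ index → index ≤ (weights.length : Int) →
      ((weights.length : Int) - index).toNat = k →
      ex8WeightOnBothSides n weights index = pvReach n (weights.drop index.toNat) := by
  intro k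
  induction k with
  | zero =>
    intro n index h0 hle hk
    have hix : index = (weights.length : Int) := by omega
    have hdrop : weights.drop index.toNat = [] := by
      apply List.drop_eq_nil_of_le; omega
    rw [ex8WeightOnBothSides, hdrop]
    by_cases hn : n = 0
    · simp [hn, pvReach]
    · simp [hn, hix, pvReach]
  | succ k ih =>
    intro n index h0 hle hk
    have hlt : index < (weights.length : Int) := by omega
    have hget : PySem.List.pyGet? weights index = some weights[index.toNat] := by
      exact PySem.List.pyGet?_eq_some_getElem weights h0 hlt
    have hdrop : weights.drop index.toNat
        = weights[index.toNat] :: weights.drop (index.toNat + 1) := by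
      exact List.drop_eq_getElem_cons (by omega)
    have htn : (index + 1).toNat = index.toNat + 1 := by omega
    by_cases hn : n = 0
    · subst hn
      rw [pvReach_zero, ex8WeightOnBothSides]
      simp
    · have hne : ¬ (index = (weights.length : Int)) := by omega
      rw [ex8_unfold n weights index _ hn hne hget,
          ih _ _ (by omega) (by omega) (by omega),
          ih _ _ (by omega) (by omega) (by omega),
          ih _ _ (by omega) (by omega) (by omega)]
      rw [hdrop, pvReach, htn]

theorem ex8Loop_iff (n : Int) (ws : List Int) :
    ∀ (r : PySem.Set Int),
      ex8Loop n ws r = true ↔ ∃ s ∈ r, pvReach (n - s) ws = true := by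
  induction ws with
  | nil =>
    intro r
    rw [ex8Loop, PySem.Set.contains_iff]
    constructor
    · intro h; exact ⟨n, h, by simp [pvReach]⟩
    · rintro ⟨s, hs, h⟩
      have h0 : n - s = 0 := by simpa [pvReach] using h
      have : n = s := by omega
      rwa [this]
  | cons w ws ih =>
    intro r
    rw [ex8Loop]
    by_cases hc : PySem.Set.contains r n = true
    · rw [if_pos hc]
      simp only [true_iff]
      exact ⟨n, (PySem.Set.contains_iff r n).1 hc, by rw [sub_self, pvReach_zero]⟩
    · rw [if_neg hc, ih]
      constructor
      · rintro ⟨t, ht, hr⟩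
        rw [PySem.Set.mem_ofList, List.mem_flatMap] at ht
        obtain ⟨s, hs, hts⟩ := ht
        refine ⟨s, hs, ?_⟩
        rw [pvReach]
        simp only [List.mem_cons, List.not_mem_nil, or_false] at hts
        rcases hts with h | h | h
        · subst h
          have : n - (s + -w) = n - s + w := by ring
          rw [this] at hr; simp [hr]
        · subst h
          have : n - (s + 0) = n - s := by ring
          rw [this] at hr; simp [hr]
        · subst h
          have : n - (s + w) = n - s - w := by ring
          rw [this] at hr; simp [hr]
      · rintro ⟨s, hs, hr⟩
        rw [pvReach] at hr
        simp only [Bool.or_eq_true] at hr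
        have hmem : ∀ d ∈ ([s + -w, s + 0, s + w] : List Int),
            d ∈ PySem.Set.ofList (r.flatMap (fun t => [t + -w, t + 0, t + w])) := by
          intro d hd
          rw [PySem.Set.mem_ofList, List.mem_flatMap]
          exact ⟨s, hs, hd⟩
        rcases hr with (h | h) | h
        · exact ⟨s + w, hmem _ (by simp), by
            have : n - (s + w) = n - s - w := by ring
            rw [this]; exact h⟩
        · exact ⟨s + 0, hmem _ (by simp), by
            have : n - (s + 0) = n - s := by ring
            rw [this]; exact h⟩
        · exact ⟨s + -w, hmem _ (by simp), by
            have : n - (s + -w) = n - s + w := by ring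
            rw [this]; exact h⟩

theorem alt_eq_reach (n : Int) (weights : List Int) (index : Int) :
    ex8WeightOnBothSides_alt n weights index
      = pvReach n (PySem.List.slice weights (some index) none) := by
  unfold ex8WeightOnBothSides_alt
  have h0 : PySem.Set.ofList ([0] : List Int) = [0] := rfl
  rw [h0, Bool.eq_iff_iff, ex8Loop_iff]
  constructor
  · rintro ⟨s, hs, h⟩
    simp only [List.mem_singleton] at hs
    subst hs
    simpa using h
  · intro h
    exact ⟨0, by simp, by simpa using h⟩

-- ===== VERDICT (by name: the statement is the Claim_ definition above) =====
theorem ex8WeightOnBothSides_spec : Claim_equal_ex8WeightOnBothSides := by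
  intro n weights index _hdom hpre
  unfold Spec_ex8WeightOnBothSides
  rw [alt_eq_reach]
  by_cases hn : n = 0
  · subst hn
    rw [pvReach_zero]
    rw [ex8WeightOnBothSides]
    simp
  · rcases hpre with h0 | ⟨h1, h2⟩
    · exact absurd h0 hn
    · rw [PySem.List.slice_from weights h1]
      exact ex8_eq_reach weights ((weights.length : Int) - index).toNat n index h1 h2 rfl
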